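-- pv_equiv track=rewrite | github.com/j4c0bs/spectron | spectron/MaxDict.py | detect_mixed_terminal_keys
-- ===== SOURCE A (Python) =====
-- from typing import AbstractSet, Dict, Generator, List, Optional, Tuple
--
-- def is_parent(parent_key: Tuple[str], key: Tuple[str]) -> bool:
--     """Determines if keys have parent:child relationship.
--
--     Example using dot notation:
--         is_parent(a.b, a.b.c) == True
--         is_parent(a.b, a.b.c.d) == True
--         is_parent(a.b, a.x.y) == False
--
--     """
--
--     return len(key) > len(parent_key) and key[: len(parent_key)] == parent_key
--
-- def detect_mixed_terminal_keys(keys: List[Tuple[str]]) -> List[Tuple[str]]: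
--     """Detect terminal keys which are also parent keys.
--
--     Example using dot notation:
--         - a.b (added to override_keysride)
--         - a.b.c
--     """
--
--     max_num_keys = max(len(k) for k in keys)
--     mixed_terminal_keys = []
--
--     for parent_key in (k for k in keys if len(k) < max_num_keys):
--         parent_key_len = len(parent_key)
--         for child_key in (k for k in keys if len(k) > parent_key_len):
--             if is_parent(parent_key, child_key):
--                 mixed_terminal_keys.append(parent_key)
--                 break
--
--     return sorted(mixed_terminal_keys, key=lambda t: len(t))
-- ===== SOURCE B (Python) =====
-- def detect_mixed_terminal_keys(keys):
--     """Detect terminal keys which are also parent keys (prefix-set method)."""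
--     prefixes = set()
--     for k in keys:
--         for i in range(len(k)):
--             prefixes.add(k[:i])
--     mixed = [k for k in keys if k in prefixes]
--     return sorted(mixed, key=len)
-- ===== Notes on version B (the rewrite author's own statement) =====
-- stated objective: alternative
-- what changed: Instead of A's per-parent scan over all keys testing is_parent (with a break on the first child), B builds one set of every proper prefix of every key and keeps exactly the keys that are members of that set, then sorts by length as A does.
-- outside the precondition, e.g. on detect_mixed_terminal_keys([]): A raises ValueError, B returns []
import Mathlib
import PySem

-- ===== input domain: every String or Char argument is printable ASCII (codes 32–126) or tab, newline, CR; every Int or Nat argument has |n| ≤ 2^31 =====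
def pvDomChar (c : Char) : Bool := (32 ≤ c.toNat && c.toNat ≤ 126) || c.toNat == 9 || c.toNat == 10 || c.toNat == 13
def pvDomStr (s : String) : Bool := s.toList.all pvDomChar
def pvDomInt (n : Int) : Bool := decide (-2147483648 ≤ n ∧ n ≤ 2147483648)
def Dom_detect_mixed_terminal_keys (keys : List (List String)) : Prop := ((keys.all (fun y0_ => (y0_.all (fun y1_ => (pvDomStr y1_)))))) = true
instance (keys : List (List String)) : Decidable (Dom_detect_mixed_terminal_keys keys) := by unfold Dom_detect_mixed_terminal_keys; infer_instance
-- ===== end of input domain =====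

-- B replaces A's per-parent scan over all keys by a set of all proper prefixes of all keys
-- (one membership test per key); equivalence is proved on nonempty key lists (A raises on []).

-- ===== PORT A =====
-- is_parent(parent_key, key): len(key) > len(parent_key) and key[:len(parent_key)] == parent_key
-- (key[:n] with 0 ≤ n = List.take n, exact here since the bound is a nonneg length)
def is_parent (parent_key key : List String) : Bool :=
  decide (parent_key.length < key.length) && decide (key.take parent_key.length = parent_key)

-- literal port of A; max(...) of the empty list raises in Python: Pre_ excludes keys = [],
-- the .getD 0 is never relied on inside Pre_
def detect_mixed_terminal_keys (keys : List (List String)) : List (List String) :=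
  let maxNumKeys : Int := (PySem.List.max? (keys.map (fun k => (k.length : Int))) (fun x => x)).getD 0
  let mixed :=
    (keys.filter (fun k => decide ((k.length : Int) < maxNumKeys))).foldl
      (fun acc parent_key =>
        -- inner 'for … if is_parent: append; break' = first hit or nothing = any
        if (keys.filter (fun k => decide ((parent_key.length : Int) < (k.length : Int)))).any
             (fun child_key => is_parent parent_key child_key)
        then acc ++ [parent_key] else acc)
      []
  PySem.List.sorted mixed (fun t => t.length) false

-- ===== PORT B =====
-- literal port of Source B; range(len(k)) = List.range k.length, k[:i] with 0 ≤ i = List.take i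
def detect_mixed_terminal_keys_alt (keys : List (List String)) : List (List String) :=
  let prefixes : PySem.Set (List String) :=
    keys.foldl (fun s k => (List.range k.length).foldl (fun s i => PySem.Set.add s (k.take i)) s)
      PySem.Set.empty
  let mixed := keys.filter (fun k => PySem.Set.contains prefixes k)
  PySem.List.sorted mixed (fun t => t.length) false

-- ===== PRECONDITION & SPEC =====
-- Pre_ excludes exactly keys = [], where Python A raises ValueError (max of an empty sequence)
def Pre_detect_mixed_terminal_keys (keys : List (List String)) : Prop := keys ≠ []
instance (keys : List (List String)) : Decidable (Pre_detect_mixed_terminal_keys keys) := by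
  unfold Pre_detect_mixed_terminal_keys; infer_instance

def pvWitness_detect_mixed_terminal_keys : List (List String) := [["a"], ["a", "b"]]

def Spec_detect_mixed_terminal_keys (keys : List (List String)) (out : List (List String)) : Prop :=
  out = detect_mixed_terminal_keys_alt keys
instance (keys : List (List String)) (out : List (List String)) :
    Decidable (Spec_detect_mixed_terminal_keys keys out) := by
  unfold Spec_detect_mixed_terminal_keys; infer_instance

-- ===== CLAIM (what is proved, stated in full; the proofs are below) =====
def Claim_equal_detect_mixed_terminal_keys : Prop :=
  ∀ (keys : List (List String)), Dom_detect_mixed_terminal_keys keys →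
    Pre_detect_mixed_terminal_keys keys →
    Spec_detect_mixed_terminal_keys keys (detect_mixed_terminal_keys keys)

-- ===== LEMMAS AND PROOFS =====

-- membership in B's prefix set: exactly the proper prefixes of the keys
lemma mem_prefix_fold (keys : List (List String)) (s : PySem.Set (List String)) (y : List String) :
    y ∈ keys.foldl (fun s k => (List.range k.length).foldl (fun s i => PySem.Set.add s (k.take i)) s) s ↔
      y ∈ s ∨ ∃ k ∈ keys, ∃ i, i < k.length ∧ k.take i = y := by
  induction keys generalizing s with
  | nil => simp
  | cons c t ih =>
      simp only [List.foldl_cons, ih, PySem.Set.mem_foldl_add, List.mem_range, List.mem_cons]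
      constructor
      · rintro (⟨h | ⟨i, hi, hy⟩⟩ | ⟨k, hk, i, hi, hy⟩)
        · exact Or.inl h
        · exact Or.inr ⟨c, Or.inl rfl, i, hi, hy.symm⟩
        · exact Or.inr ⟨k, Or.inr hk, i, hi, hy⟩
      · rintro (h | ⟨k, rfl | hk, i, hi, hy⟩)
        · exact Or.inl (Or.inl h)
        · exact Or.inl (Or.inr ⟨i, hi, hy.symm⟩)
        · exact Or.inr ⟨k, hk, i, hi, hy⟩

-- a proper prefix taken at index i has length i
lemma take_len {c k : List String} {i : Nat} (hi : i < c.length) (h : c.take i = k) :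
    k.length = i := by
  have := congrArg List.length h
  simpa [Nat.min_eq_left (Nat.le_of_lt hi)] using this.symm

-- a member of keys that is a proper prefix of a member has length < the max length
lemma lt_max_of_witness (keys : List (List String)) (k c : List String) (hc : c ∈ keys)
    (hlt : k.length < c.length) :
    (k.length : Int) < (PySem.List.max? (keys.map (fun k => (k.length : Int))) (fun x => x)).getD 0 := by
  obtain ⟨m, hm⟩ : ∃ m, PySem.List.max? (keys.map (fun k => (k.length : Int))) (fun x => x) = some m := by
    cases h : PySem.List.max? (keys.map (fun k => (k.length : Int))) (fun x => x) with
    | none =>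
        rw [PySem.List.max?_eq_none_iff, List.map_eq_nil_iff] at h
        subst h; cases hc
    | some m => exact ⟨m, rfl⟩
  have hcm : ((c.length : Int)) ≤ m :=
    PySem.List.max?_isMax hm _ (List.mem_map_of_mem hc)
  rw [hm]
  exact lt_of_lt_of_le (by exact_mod_cast hlt) hcm

-- the two filter predicates agree on every element of keys
lemma pred_agree (keys : List (List String)) (k : List String) :
    ((keys.filter (fun c => decide ((k.length : Int) < (c.length : Int)))).any
        (fun c => is_parent k c) &&
      decide ((k.length : Int) < (PySem.List.max? (keys.map (fun k => (k.length : Int))) (fun x => x)).getD 0))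
      = PySem.Set.contains
          (keys.foldl (fun s k => (List.range k.length).foldl (fun s i => PySem.Set.add s (k.take i)) s)
            PySem.Set.empty) k := by
  rw [Bool.eq_iff_iff]
  simp only [PySem.Set.contains_iff, mem_prefix_fold, List.any_eq_true, List.mem_filter,
    is_parent, Bool.and_eq_true, decide_eq_true_eq, PySem.Set.empty, List.not_mem_nil, false_or]
  constructor
  · rintro ⟨⟨c, ⟨hc, _⟩, hlt, htake⟩, _⟩
    exact ⟨c, hc, k.length, hlt, htake⟩
  · rintro ⟨c, hc, i, hi, htake⟩
    have hlen : k.length = i := take_len hi htake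
    subst hlen
    exact ⟨⟨c, ⟨hc, by exact_mod_cast hi⟩, hi, htake⟩,
      lt_max_of_witness keys k c hc hi⟩

-- ===== VERDICT (by name: the statement is the Claim_ definition above) =====
theorem detect_mixed_terminal_keys_spec : Claim_equal_detect_mixed_terminal_keys := by
  intro keys _ _
  show detect_mixed_terminal_keys keys = detect_mixed_terminal_keys_alt keys
  unfold detect_mixed_terminal_keys detect_mixed_terminal_keys_alt
  simp only [PySem.List.foldl_append_if_eq_filter, List.nil_append, List.filter_filter]
  congr 1
  exact List.filter_congr (fun k _ => pred_agree keys k)
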